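-- pv_equiv track=rewrite | github.com/Stormsouls/portfolio | import-bot/evaluador_productos.py | check_restricciones
-- ===== SOURCE A (Python) =====
-- ALERTAS_REGULATORIAS = {
--     # ── BLOQUEADO: no importar sin asesoría legal especializada ──────────
--     "protein powder":    ("BLOQUEADO 🚫", "ANMAT+SENASA: alimento-suplemento, registro larguísimo"),
--     "whey protein":      ("BLOQUEADO 🚫", "ANMAT+SENASA: alimento-suplemento"),
--     "creatine":          ("BLOQUEADO 🚫", "ANMAT+SENASA: suplemento deportivo"),
--     "pre-workout":       ("BLOQUEADO 🚫", "ANMAT+SENASA: suplemento deportivo"),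
--     "pre workout":       ("BLOQUEADO 🚫", "ANMAT+SENASA: suplemento deportivo"),
--     "energy drink":      ("BLOQUEADO 🚫", "SENASA: bebida energética, habilitación compleja"),
--     "drink mix":         ("BLOQUEADO 🚫", "SENASA: alimento procesado, habilitación compleja"),
--     "fat burner":        ("BLOQUEADO 🚫", "ANMAT: producto para adelgazar, restricción estricta"),
--     "weight loss":       ("BLOQUEADO 🚫", "ANMAT: producto para adelgazar, restricción estricta"),
--
--     # ── COMPLEJO: posible pero requiere gestión regulatoria seria ─────────
--     "supplement":        ("COMPLEJO ⚠️", "ANMAT: suplemento dietario requiere RNPA (meses de trámite)"),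
--     "vitamin":           ("COMPLEJO ⚠️", "ANMAT: vitaminas requieren registro sanitario"),
--     "magnesium":         ("COMPLEJO ⚠️", "ANMAT: mineral-suplemento requiere RNPA"),
--     "collagen supplement":("COMPLEJO ⚠️","ANMAT: suplemento de colágeno requiere RNPA"),
--     "melatonin":         ("COMPLEJO ⚠️", "ANMAT: considerado medicamento en Argentina"),
--     "wireless charger":  ("COMPLEJO ⚠️", "ENACOM: electrónico inalámbrico requiere certificación"),
--     "bluetooth":         ("COMPLEJO ⚠️", "ENACOM: dispositivo bluetooth requiere certificación"),
--     "electric shaver":   ("COMPLEJO ⚠️", "ENACOM + seguridad eléctrica"),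
--     "hair dryer":        ("COMPLEJO ⚠️", "ENACOM + seguridad eléctrica"),
--     "laser":             ("COMPLEJO ⚠️", "ANMAT: dispositivo láser requiere registro"),
--
--     # ── MODERADO: posible, hay un trámite pero no es prohibitivo ─────────
--     "serum":             ("MODERADO ℹ️", "ANMAT: cosmético requiere RNPA cosmético (gestionable)"),
--     "retinol":           ("MODERADO ℹ️", "ANMAT: cosmético con activo requiere RNPA"),
--     "sunscreen":         ("MODERADO ℹ️", "ANMAT: FPS requiere RNPA especial de cosméticos"),
--     "whitening strip":   ("MODERADO ℹ️", "ANMAT: blanqueador dental puede requerir registro"),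
--     "teeth whitening":   ("MODERADO ℹ️", "ANMAT: blanqueador dental puede requerir registro"),
--     "face cream":        ("MODERADO ℹ️", "ANMAT: cosmético requiere RNPA (proceso gestionable)"),
--     "moisturizer":       ("MODERADO ℹ️", "ANMAT: cosmético requiere RNPA"),
--     "toy":               ("MODERADO ℹ️", "IRAM: juguetes requieren certificación de seguridad"),
-- }
--
-- def check_restricciones(nombre, categoria=""):
--     """
--     Verifica si el producto tiene restricciones de importación/venta en Argentina.
--     Retorna (nivel, descripcion). Si no hay restricción: ("OK ✅", "Sin restricciones conocidas").
--     """
--     texto = (nombre + " " + str(categoria)).lower()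
--
--     # Orden de severidad: primero los más graves
--     orden = ["BLOQUEADO 🚫", "COMPLEJO ⚠️", "MODERADO ℹ️"]
--     encontrados = {}
--
--     for keyword, (nivel, desc) in ALERTAS_REGULATORIAS.items():
--         if keyword in texto:
--             if nivel not in encontrados:
--                 encontrados[nivel] = desc
--
--     # Devolver el más severo
--     for nivel in orden:
--         if nivel in encontrados:
--             return nivel, encontrados[nivel]
--
--     return "OK ✅", "Sin restricciones conocidas"
-- ===== SOURCE B (Python) =====
-- # Same classification, but the table is kept pre-grouped by severity level and
-- # scanned priority-first with an early return (no accumulator, no resolution pass).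
-- GRUPOS = [
--     ('BLOQUEADO 🚫', [
--         ('protein powder', 'ANMAT+SENASA: alimento-suplemento, registro larguísimo'),
--         ('whey protein', 'ANMAT+SENASA: alimento-suplemento'),
--         ('creatine', 'ANMAT+SENASA: suplemento deportivo'),
--         ('pre-workout', 'ANMAT+SENASA: suplemento deportivo'),
--         ('pre workout', 'ANMAT+SENASA: suplemento deportivo'),
--         ('energy drink', 'SENASA: bebida energética, habilitación compleja'),
--         ('drink mix', 'SENASA: alimento procesado, habilitación compleja'),
--         ('fat burner', 'ANMAT: producto para adelgazar, restricción estricta'),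
--         ('weight loss', 'ANMAT: producto para adelgazar, restricción estricta'),
--     ]),
--     ('COMPLEJO ⚠️', [
--         ('supplement', 'ANMAT: suplemento dietario requiere RNPA (meses de trámite)'),
--         ('vitamin', 'ANMAT: vitaminas requieren registro sanitario'),
--         ('magnesium', 'ANMAT: mineral-suplemento requiere RNPA'),
--         ('collagen supplement', 'ANMAT: suplemento de colágeno requiere RNPA'),
--         ('melatonin', 'ANMAT: considerado medicamento en Argentina'),
--         ('wireless charger', 'ENACOM: electrónico inalámbrico requiere certificación'),
--         ('bluetooth', 'ENACOM: dispositivo bluetooth requiere certificación'),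
--         ('electric shaver', 'ENACOM + seguridad eléctrica'),
--         ('hair dryer', 'ENACOM + seguridad eléctrica'),
--         ('laser', 'ANMAT: dispositivo láser requiere registro'),
--     ]),
--     ('MODERADO ℹ️', [
--         ('serum', 'ANMAT: cosmético requiere RNPA cosmético (gestionable)'),
--         ('retinol', 'ANMAT: cosmético con activo requiere RNPA'),
--         ('sunscreen', 'ANMAT: FPS requiere RNPA especial de cosméticos'),
--         ('whitening strip', 'ANMAT: blanqueador dental puede requerir registro'),
--         ('teeth whitening', 'ANMAT: blanqueador dental puede requerir registro'),
--         ('face cream', 'ANMAT: cosmético requiere RNPA (proceso gestionable)'),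
--         ('moisturizer', 'ANMAT: cosmético requiere RNPA'),
--         ('toy', 'IRAM: juguetes requieren certificación de seguridad'),
--     ]),
-- ]
--
--
-- def check_restricciones(nombre, categoria=""):
--     """Priority-first search over the severity-grouped table: return the first
--     matching keyword of the most severe level, short-circuiting."""
--     texto = (nombre + " " + str(categoria)).lower()
--     for nivel, pares in GRUPOS:
--         for keyword, desc in pares:
--             if keyword in texto:
--                 return nivel, desc
--     return "OK ✅", "Sin restricciones conocidas"
-- ===== Notes on version B (the rewrite author's own statement) =====
-- stated objective: alternative
-- what changed: Replaces A's flat-table pass that collects all matches into a severity-keyed dict plus a second resolution loop with a table pre-grouped by severity level scanned priority-first with an early return (no accumulator, no second pass).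
import Mathlib
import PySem

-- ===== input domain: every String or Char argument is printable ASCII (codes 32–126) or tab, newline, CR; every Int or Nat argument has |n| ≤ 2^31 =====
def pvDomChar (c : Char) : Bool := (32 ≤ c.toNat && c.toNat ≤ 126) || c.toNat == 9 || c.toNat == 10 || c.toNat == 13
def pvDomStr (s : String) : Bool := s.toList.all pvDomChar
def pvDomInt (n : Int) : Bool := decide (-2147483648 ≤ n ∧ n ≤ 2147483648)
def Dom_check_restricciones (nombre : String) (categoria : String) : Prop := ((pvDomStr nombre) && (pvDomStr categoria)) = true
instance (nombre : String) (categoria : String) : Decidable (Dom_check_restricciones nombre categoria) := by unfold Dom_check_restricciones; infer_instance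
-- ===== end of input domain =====

-- B keeps the keyword table pre-grouped by severity level and scans it priority-first
-- with an early return, instead of A's collect-all-matches dict plus a resolution pass
-- (objective: alternative decomposition / data structure).

-- ===== PORT A =====
-- the module constant ALERTAS_REGULATORIAS as A iterates it (insertion order)
def pvAlertas : List (String × String × String) :=
  [("protein powder", "BLOQUEADO 🚫", "ANMAT+SENASA: alimento-suplemento, registro larguísimo"),
    ("whey protein", "BLOQUEADO 🚫", "ANMAT+SENASA: alimento-suplemento"),
    ("creatine", "BLOQUEADO 🚫", "ANMAT+SENASA: suplemento deportivo"),
    ("pre-workout", "BLOQUEADO 🚫", "ANMAT+SENASA: suplemento deportivo"),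
    ("pre workout", "BLOQUEADO 🚫", "ANMAT+SENASA: suplemento deportivo"),
    ("energy drink", "BLOQUEADO 🚫", "SENASA: bebida energética, habilitación compleja"),
    ("drink mix", "BLOQUEADO 🚫", "SENASA: alimento procesado, habilitación compleja"),
    ("fat burner", "BLOQUEADO 🚫", "ANMAT: producto para adelgazar, restricción estricta"),
    ("weight loss", "BLOQUEADO 🚫", "ANMAT: producto para adelgazar, restricción estricta"),
    ("supplement", "COMPLEJO ⚠️", "ANMAT: suplemento dietario requiere RNPA (meses de trámite)"),
    ("vitamin", "COMPLEJO ⚠️", "ANMAT: vitaminas requieren registro sanitario"),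
    ("magnesium", "COMPLEJO ⚠️", "ANMAT: mineral-suplemento requiere RNPA"),
    ("collagen supplement", "COMPLEJO ⚠️", "ANMAT: suplemento de colágeno requiere RNPA"),
    ("melatonin", "COMPLEJO ⚠️", "ANMAT: considerado medicamento en Argentina"),
    ("wireless charger", "COMPLEJO ⚠️", "ENACOM: electrónico inalámbrico requiere certificación"),
    ("bluetooth", "COMPLEJO ⚠️", "ENACOM: dispositivo bluetooth requiere certificación"),
    ("electric shaver", "COMPLEJO ⚠️", "ENACOM + seguridad eléctrica"),
    ("hair dryer", "COMPLEJO ⚠️", "ENACOM + seguridad eléctrica"),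
    ("laser", "COMPLEJO ⚠️", "ANMAT: dispositivo láser requiere registro"),
    ("serum", "MODERADO ℹ️", "ANMAT: cosmético requiere RNPA cosmético (gestionable)"),
    ("retinol", "MODERADO ℹ️", "ANMAT: cosmético con activo requiere RNPA"),
    ("sunscreen", "MODERADO ℹ️", "ANMAT: FPS requiere RNPA especial de cosméticos"),
    ("whitening strip", "MODERADO ℹ️", "ANMAT: blanqueador dental puede requerir registro"),
    ("teeth whitening", "MODERADO ℹ️", "ANMAT: blanqueador dental puede requerir registro"),
    ("face cream", "MODERADO ℹ️", "ANMAT: cosmético requiere RNPA (proceso gestionable)"),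
    ("moisturizer", "MODERADO ℹ️", "ANMAT: cosmético requiere RNPA"),
    ("toy", "MODERADO ℹ️", "IRAM: juguetes requieren certificación de seguridad") ]

-- 'for nivel in orden: if nivel in encontrados: return nivel, encontrados[nivel]'
def pvResolveA (d : PySem.Dict String String) : List String → String × String
  | [] => ("OK ✅", "Sin restricciones conocidas")
  | n :: rest =>
      match d.get? n with
      | some v => (n, v)
      | none => pvResolveA d rest

def check_restricciones (nombre : String) (categoria : String) : String × String :=
  let texto := PySem.Str.lower (nombre ++ " " ++ categoria)
  let encontrados := pvAlertas.foldl (fun d e =>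
      if PySem.Str.isIn e.1 texto then
        if d.contains e.2.1 then d else d.insert e.2.1 e.2.2
      else d) PySem.Dict.empty
  pvResolveA encontrados ["BLOQUEADO 🚫", "COMPLEJO ⚠️", "MODERADO ℹ️"]

-- ===== PORT B =====
-- the module constant GRUPOS: the same data, pre-grouped by severity level
def pvBloq : List (String × String) :=
  [("protein powder", "ANMAT+SENASA: alimento-suplemento, registro larguísimo"),
    ("whey protein", "ANMAT+SENASA: alimento-suplemento"),
    ("creatine", "ANMAT+SENASA: suplemento deportivo"),
    ("pre-workout", "ANMAT+SENASA: suplemento deportivo"),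
    ("pre workout", "ANMAT+SENASA: suplemento deportivo"),
    ("energy drink", "SENASA: bebida energética, habilitación compleja"),
    ("drink mix", "SENASA: alimento procesado, habilitación compleja"),
    ("fat burner", "ANMAT: producto para adelgazar, restricción estricta"),
    ("weight loss", "ANMAT: producto para adelgazar, restricción estricta") ]

def pvComp : List (String × String) :=
  [("supplement", "ANMAT: suplemento dietario requiere RNPA (meses de trámite)"),
    ("vitamin", "ANMAT: vitaminas requieren registro sanitario"),
    ("magnesium", "ANMAT: mineral-suplemento requiere RNPA"),
    ("collagen supplement", "ANMAT: suplemento de colágeno requiere RNPA"),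
    ("melatonin", "ANMAT: considerado medicamento en Argentina"),
    ("wireless charger", "ENACOM: electrónico inalámbrico requiere certificación"),
    ("bluetooth", "ENACOM: dispositivo bluetooth requiere certificación"),
    ("electric shaver", "ENACOM + seguridad eléctrica"),
    ("hair dryer", "ENACOM + seguridad eléctrica"),
    ("laser", "ANMAT: dispositivo láser requiere registro") ]

def pvMod : List (String × String) :=
  [("serum", "ANMAT: cosmético requiere RNPA cosmético (gestionable)"),
    ("retinol", "ANMAT: cosmético con activo requiere RNPA"),
    ("sunscreen", "ANMAT: FPS requiere RNPA especial de cosméticos"),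
    ("whitening strip", "ANMAT: blanqueador dental puede requerir registro"),
    ("teeth whitening", "ANMAT: blanqueador dental puede requerir registro"),
    ("face cream", "ANMAT: cosmético requiere RNPA (proceso gestionable)"),
    ("moisturizer", "ANMAT: cosmético requiere RNPA"),
    ("toy", "IRAM: juguetes requieren certificación de seguridad") ]

def pvGrupos : List (String × List (String × String)) :=
  [("BLOQUEADO 🚫", pvBloq), ("COMPLEJO ⚠️", pvComp), ("MODERADO ℹ️", pvMod)]

-- inner loop: 'for keyword, desc in pares: if keyword in texto: return nivel, desc'
def pvFirstHit (texto : String) : List (String × String) → Option String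
  | [] => none
  | p :: rest => if PySem.Str.isIn p.1 texto then some p.2 else pvFirstHit texto rest

-- outer loop: 'for nivel, pares in GRUPOS: …' with early return
def pvPriorityScan (texto : String) : List (String × List (String × String)) → String × String
  | [] => ("OK ✅", "Sin restricciones conocidas")
  | g :: rest =>
      match pvFirstHit texto g.2 with
      | some desc => (g.1, desc)
      | none => pvPriorityScan texto rest

def check_restricciones_alt (nombre : String) (categoria : String) : String × String :=
  pvPriorityScan (PySem.Str.lower (nombre ++ " " ++ categoria)) pvGrupos

-- ===== PRECONDITION & SPEC =====
def Spec_check_restricciones (nombre : String) (categoria : String) (out : String × String) : Prop := out = check_restricciones_alt nombre categoria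
instance (nombre : String) (categoria : String) (out : String × String) : Decidable (Spec_check_restricciones nombre categoria out) := by unfold Spec_check_restricciones; infer_instance

-- ===== CLAIM =====
def Claim_equal_check_restricciones : Prop := ∀ (nombre : String) (categoria : String), Dom_check_restricciones nombre categoria → Spec_check_restricciones nombre categoria (check_restricciones nombre categoria)

-- ===== LEMMAS AND PROOFS =====

-- A's flat table is exactly B's three severity groups, tagged and concatenated
theorem pvAlertas_split :
    pvAlertas = pvBloq.map (fun p => (p.1, "BLOQUEADO 🚫", p.2))
      ++ pvComp.map (fun p => (p.1, "COMPLEJO ⚠️", p.2))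
      ++ pvMod.map (fun p => (p.1, "MODERADO ℹ️", p.2)) := by decide

-- A's accumulator pass over one severity block, characterised by B's first-match scan
theorem foldA_block (texto L : String) (g : List (String × String)) (d : PySem.Dict String String) :
    ((g.map (fun p => (p.1, L, p.2))).foldl (fun d e =>
        if PySem.Str.isIn e.1 texto then
          if d.contains e.2.1 then d else d.insert e.2.1 e.2.2
        else d) d)
      = if d.contains L then d
        else match pvFirstHit texto g with
             | some desc => d.insert L desc
             | none => d := by
  induction g generalizing d with
  | nil => simp [pvFirstHit]
  | cons p rest ih =>
      simp only [List.map_cons, List.foldl_cons, pvFirstHit]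
      by_cases hin : PySem.Str.isIn p.1 texto
      · simp only [hin, if_true]
        by_cases hc : d.contains L
        · simp only [hc, if_true, ih]
        · simp only [hc, if_false, Bool.false_eq_true, ih,
            PySem.Dict.contains_insert_self, if_true]
      · simp only [hin, Bool.false_eq_true, if_false, ih]

theorem check_restricciones_core (texto : String) :
    pvResolveA (pvAlertas.foldl (fun d e =>
        if PySem.Str.isIn e.1 texto then
          if d.contains e.2.1 then d else d.insert e.2.1 e.2.2
        else d) PySem.Dict.empty) ["BLOQUEADO 🚫", "COMPLEJO ⚠️", "MODERADO ℹ️"]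
      = pvPriorityScan texto pvGrupos := by
  conv_lhs => rw [pvAlertas_split]
  simp only [List.foldl_append, foldA_block]
  simp only [pvGrupos, pvPriorityScan]
  rcases hsB : pvFirstHit texto pvBloq with _ | dB <;>
    rcases hsC : pvFirstHit texto pvComp with _ | dC <;>
      rcases hsM : pvFirstHit texto pvMod with _ | dM <;>
        simp [pvResolveA, PySem.Dict.contains_insert, PySem.Dict.get?_insert,
          PySem.Dict.contains_empty, PySem.Dict.get?_empty]

-- ===== VERDICT =====
theorem check_restricciones_spec : Claim_equal_check_restricciones := by
  intro nombre categoria _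
  unfold Spec_check_restricciones check_restricciones check_restricciones_alt
  exact check_restricciones_core _
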